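-- pv_equiv track=rewrite | github.com/c-okelly/advent_of_code_2017 | python/day04.py | part2
-- ===== SOURCE A (Python) =====
-- def part2(puzzleInput):
--
--     totalValid = 0
--     rows = puzzleInput.split("\n")
--     for row in rows:
--         phrases = set()
--         duplicate = True
--         words = row.split()
--         for word in words:
--             word = ''.join(sorted(word))
--             if word in phrases:
--                 duplicate = False
--             phrases.add(word)
--         if (duplicate == True):
--             totalValid += 1
--
--     return totalValid
-- ===== SOURCE B (Python) =====
-- def part2(puzzleInput):
--     total = 0
--     for row in puzzleInput.split("\n"):
--         canon = sorted(''.join(sorted(w)) for w in row.split())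
--         if not any(x == y for x, y in zip(canon, canon[1:])):
--             total += 1
--     return total
-- ===== Notes on version B (the rewrite author's own statement) =====
-- stated objective: alternative
-- what changed: Detects anagram duplicates per line by sorting the list of letter-sorted words and comparing adjacent entries, instead of A's set-membership scan with a flag.
import Mathlib
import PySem

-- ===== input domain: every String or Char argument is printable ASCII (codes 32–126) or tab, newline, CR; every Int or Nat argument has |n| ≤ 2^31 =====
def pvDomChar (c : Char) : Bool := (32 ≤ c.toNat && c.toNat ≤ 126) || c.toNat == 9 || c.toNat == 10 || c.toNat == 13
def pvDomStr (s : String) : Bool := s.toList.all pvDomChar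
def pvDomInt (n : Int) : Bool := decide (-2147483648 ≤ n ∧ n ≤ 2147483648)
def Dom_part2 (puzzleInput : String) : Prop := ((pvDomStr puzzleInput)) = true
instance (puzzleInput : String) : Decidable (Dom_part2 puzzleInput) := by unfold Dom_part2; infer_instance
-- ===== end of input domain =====

-- B replaces A's per-line set-membership duplicate scan by sorting the canonical word list
-- and comparing adjacent entries (alternative algorithm, same observable result).

-- ===== PORT A =====
-- ''.join(sorted(word)) : the canonical (letter-sorted) form of a word, as its character list
def canonWord (w : String) : List Char := PySem.List.sorted w.toList (fun c => c) false

def part2 (puzzleInput : String) : Int :=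
  ((PySem.Str.split? puzzleInput "\n").getD []).foldl (fun totalValid row =>
    let r := (PySem.Str.split₀ row).foldl
      (fun (st : PySem.Set (List Char) × Bool) word =>
        let w := canonWord word
        let dup := if PySem.Set.contains st.1 w then false else st.2
        (PySem.Set.add st.1 w, dup))
      (PySem.Set.empty, true)
    if r.2 = true then totalValid + 1 else totalValid) 0

-- ===== PORT B =====
def part2_alt (puzzleInput : String) : Int :=
  ((PySem.Str.split? puzzleInput "\n").getD []).foldl (fun total row =>
    let canon := PySem.List.sorted ((PySem.Str.split₀ row).map canonWord) (fun x => x) false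
    if (canon.zip canon.tail).any (fun p => p.1 == p.2) then total else total + 1) 0

-- ===== PRECONDITION & SPEC =====
def Spec_part2 (puzzleInput : String) (out : Int) : Prop := out = part2_alt puzzleInput
instance (puzzleInput : String) (out : Int) : Decidable (Spec_part2 puzzleInput out) := by unfold Spec_part2; infer_instance

-- ===== CLAIM (what is proved, stated in full; the proofs are below) =====
def Claim_equal_part2 : Prop := ∀ (puzzleInput : String), Dom_part2 puzzleInput → Spec_part2 puzzleInput (part2 puzzleInput)

-- ===== LEMMAS AND PROOFS =====

-- A's inner loop: the final flag is true iff the processed canonical words are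
-- duplicate-free and disjoint from the starting set.
lemma aFold_flag (l : List (List Char)) (s : PySem.Set (List Char)) (d : Bool) :
    (l.foldl (fun (st : PySem.Set (List Char) × Bool) w =>
        (PySem.Set.add st.1 w, if PySem.Set.contains st.1 w then false else st.2)) (s, d)).2
      = (d && decide (l.Nodup ∧ ∀ x ∈ l, x ∉ s)) := by
  induction l generalizing s d with
  | nil => simp
  | cons a t ih =>
    simp only [List.foldl_cons, ih]
    by_cases hmem : a ∈ s
    · have hc : PySem.Set.contains s a = true := (PySem.Set.contains_iff s a).mpr hmem
      simp [hmem]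
    · have hc : PySem.Set.contains s a = false := by
        cases h : PySem.Set.contains s a
        · rfl
        · exact absurd ((PySem.Set.contains_iff s a).mp h) hmem
      simp only [hc, if_neg Bool.false_ne_true]
      congr 1
      rw [decide_eq_decide]
      constructor
      · rintro ⟨h1, h2⟩
        have hat : a ∉ t := fun hat =>
          (h2 a hat) ((PySem.Set.mem_add s a a).mpr (Or.inr rfl))
        refine ⟨List.nodup_cons.mpr ⟨hat, h1⟩, ?_⟩
        intro x hx
        rcases List.mem_cons.mp hx with h' | hx'
        · exact h' ▸ hmem
        · exact fun hs => h2 x hx' ((PySem.Set.mem_add s a x).mpr (Or.inl hs))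
      · rintro ⟨h1, h2⟩
        rcases List.nodup_cons.mp h1 with ⟨hat, hnd⟩
        refine ⟨hnd, ?_⟩
        intro x hx hs
        rcases (PySem.Set.mem_add s a x).mp hs with h' | h'
        · exact h2 x (List.mem_cons_of_mem a hx) h'
        · exact hat (h' ▸ hx)

-- the adjacent-pair scan over zip is exactly adjacent distinctness
lemma zip_any_eq_false_iff (l : List (List Char)) :
    ((l.zip l.tail).any (fun p => p.1 == p.2) = false) ↔ l.IsChain (· ≠ ·) := by
  induction l with
  | nil => simp
  | cons a t ih =>
    cases t with
    | nil => simp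
    | cons b u =>
      simp only [List.tail_cons, List.zip_cons_cons, List.any_cons, Bool.or_eq_false_iff,
        beq_eq_false_iff_ne, List.isChain_cons_cons]
      exact and_congr_right fun _ => ih

-- on a (≤)-sorted list, no adjacent equals ↔ no duplicates at all
lemma chain_ne_iff_nodup (l : List (List Char))
    (h : l.Pairwise (· ≤ ·)) : l.IsChain (· ≠ ·) ↔ l.Nodup := by
  induction l with
  | nil => simp
  | cons a t ih =>
    rcases List.pairwise_cons.mp h with ⟨hle, ht⟩
    cases t with
    | nil => simp
    | cons b u =>
      rw [List.isChain_cons_cons, List.nodup_cons, ih ht]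
      constructor
      · rintro ⟨hab, hch⟩
        have hab' : a < b := lt_of_le_of_ne (hle b List.mem_cons_self) hab
        refine ⟨fun hmem => ?_, hch⟩
        rcases List.mem_cons.mp hmem with h' | hmem'
        · exact ne_of_lt hab' h'
        · rcases List.pairwise_cons.mp ht with ⟨hbu, -⟩
          exact absurd (lt_of_lt_of_le hab' (hbu a hmem')) (lt_irrefl a)
      · rintro ⟨hni, hnd⟩
        exact ⟨fun hab => hni (hab ▸ List.mem_cons_self), hnd⟩

-- per-row agreement of the two step functions
lemma row_eq (row : String) (total : Int) :
    (let r := (PySem.Str.split₀ row).foldl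
        (fun (st : PySem.Set (List Char) × Bool) word =>
          let w := canonWord word
          let dup := if PySem.Set.contains st.1 w then false else st.2
          (PySem.Set.add st.1 w, dup)) (PySem.Set.empty, true)
      if r.2 = true then total + 1 else total)
    = (let canon := PySem.List.sorted ((PySem.Str.split₀ row).map canonWord) (fun x => x) false
       if (canon.zip canon.tail).any (fun p => p.1 == p.2) then total else total + 1) := by
  set l := (PySem.Str.split₀ row).map canonWord with hl
  have hmap : (PySem.Str.split₀ row).foldl
      (fun (st : PySem.Set (List Char) × Bool) word =>
        (PySem.Set.add st.1 (canonWord word),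
          if PySem.Set.contains st.1 (canonWord word) then false else st.2))
      (PySem.Set.empty, true)
    = l.foldl (fun (st : PySem.Set (List Char) × Bool) w =>
        (PySem.Set.add st.1 w, if PySem.Set.contains st.1 w then false else st.2))
      (PySem.Set.empty, true) := by
    rw [hl, List.foldl_map]
  have hA : ((PySem.Str.split₀ row).foldl
      (fun (st : PySem.Set (List Char) × Bool) word =>
        (PySem.Set.add st.1 (canonWord word),
          if PySem.Set.contains st.1 (canonWord word) then false else st.2))
      (PySem.Set.empty, true)).2 = decide l.Nodup := by
    rw [hmap, aFold_flag]
    simp [PySem.Set.empty]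
  set canon := PySem.List.sorted l (fun x => x) false with hc
  have hperm : canon.Perm l := PySem.List.sorted_perm l _ _
  have hpw : canon.Pairwise (· ≤ ·) := by
    rw [hc]
    have hinst : (fun a b : List Char => a.decidableLT b)
        = (fun a b : List Char => LinearOrder.toDecidableLT a b) := by
      funext a b; exact Subsingleton.elim _ _
    rw [show (@PySem.List.sorted (List Char) (List Char) List.instLT
          (fun a b => a.decidableLT b) l (fun x => x) false)
        = (@PySem.List.sorted (List Char) (List Char) List.instLinearOrder.toLT
          LinearOrder.toDecidableLT l (fun x => x) false) from by rw [hinst]]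
    exact PySem.List.sorted_pairwise l (fun x : List Char => x)
  have hany : ((canon.zip canon.tail).any (fun p => p.1 == p.2)) = !decide l.Nodup := by
    by_cases hnd : l.Nodup
    · have : ((canon.zip canon.tail).any (fun p => p.1 == p.2)) = false :=
        (zip_any_eq_false_iff canon).mpr
          ((chain_ne_iff_nodup canon hpw).mpr (hperm.nodup_iff.mpr hnd))
      simp [this, hnd]
    · have : ¬ ((canon.zip canon.tail).any (fun p => p.1 == p.2)) = false := fun h =>
        hnd (hperm.nodup_iff.mp ((chain_ne_iff_nodup canon hpw).mp
          ((zip_any_eq_false_iff canon).mp h)))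
      simp only [Bool.not_eq_false] at this
      simp [this, hnd]
  show (if ((PySem.Str.split₀ row).foldl _ (PySem.Set.empty, true)).2 = true
        then total + 1 else total) = _
  rw [hA]
  show _ = (if ((canon.zip canon.tail).any (fun p => p.1 == p.2)) = true then total else total + 1)
  rw [hany]
  cases hnd : decide l.Nodup <;> simp

-- ===== VERDICT (by name: the statement is the Claim_ definition above) =====
theorem part2_spec : Claim_equal_part2 := by
  intro puzzleInput _
  unfold Spec_part2 part2 part2_alt
  have hf : (fun (totalValid : Int) (row : String) =>
      let r := (PySem.Str.split₀ row).foldl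
        (fun (st : PySem.Set (List Char) × Bool) word =>
          let w := canonWord word
          let dup := if PySem.Set.contains st.1 w then false else st.2
          (PySem.Set.add st.1 w, dup)) (PySem.Set.empty, true)
      if r.2 = true then totalValid + 1 else totalValid)
    = (fun (total : Int) (row : String) =>
      let canon := PySem.List.sorted ((PySem.Str.split₀ row).map canonWord) (fun x => x) false
      if (canon.zip canon.tail).any (fun p => p.1 == p.2) then total else total + 1) := by
    funext t r
    exact row_eq r t
  rw [hf]
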